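-- pv_equiv track=rewrite | github.com/menkobalazs/msc-thesis | 01_generate_k-mer_reads/older_versions/07_functions.py | shortest_chain
-- ===== SOURCE A (Python) =====
-- def shortest_chain(k_mers): ## --> ChatGPT code, promt: given the following array; create the shortest string which contains all element of the given array
--     '''
--     With the help of ChatGPT, the shortest string that contains all possible hexamers,
--     extending it only as much as necessary so that if a given k-mer already exists in the chain, it is not added again.
--     '''
--     result = k_mers[0]
--     for i in range(1, len(k_mers)):
--         overlap = len(k_mers[i]) - 1
--         # If the k-mer already exists in the word chain, do not append it to the result.
--         if result.count(k_mers[i]) == 0: # added to chatGPT code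
--             while overlap >= 0: # Backtracking until the k-mer matches the end of the chain.
--                 if result.endswith(k_mers[i][:overlap]):
--                     break
--                 overlap -= 1
--             result += k_mers[i][overlap:]
--     return result
-- ===== SOURCE B (Python) =====
-- def shortest_chain(k_mers):
--     result = k_mers[0]
--     for kmer in k_mers[1:]:
--         m = len(kmer)
--         if m and kmer not in result:
--             # KMP failure table of kmer
--             fail = [0] * m
--             j = 0
--             for i in range(1, m):
--                 while j and kmer[i] != kmer[j]:
--                     j = fail[j - 1]
--                 if kmer[i] == kmer[j]:
--                     j += 1
--                 fail[i] = j
--             # run the prefix automaton over the last m-1 chars of result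
--             s = 0
--             for c in (result[-(m - 1):] if m > 1 else ""):
--                 while s and c != kmer[s]:
--                     s = fail[s - 1]
--                 if c == kmer[s]:
--                     s += 1
--             result += kmer[s:]
--     return result
-- ===== Notes on version B (the rewrite author's own statement) =====
-- stated objective: faster
-- what changed: The decrementing trial-match overlap search (while overlap>=0: if result.endswith(kmer[:overlap])) is replaced by a KMP prefix-automaton: build the failure table of the k-mer and run it over the last len(kmer)-1 characters of the chain, giving the same maximal overlap in linear time in len(kmer).
import Mathlib
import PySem

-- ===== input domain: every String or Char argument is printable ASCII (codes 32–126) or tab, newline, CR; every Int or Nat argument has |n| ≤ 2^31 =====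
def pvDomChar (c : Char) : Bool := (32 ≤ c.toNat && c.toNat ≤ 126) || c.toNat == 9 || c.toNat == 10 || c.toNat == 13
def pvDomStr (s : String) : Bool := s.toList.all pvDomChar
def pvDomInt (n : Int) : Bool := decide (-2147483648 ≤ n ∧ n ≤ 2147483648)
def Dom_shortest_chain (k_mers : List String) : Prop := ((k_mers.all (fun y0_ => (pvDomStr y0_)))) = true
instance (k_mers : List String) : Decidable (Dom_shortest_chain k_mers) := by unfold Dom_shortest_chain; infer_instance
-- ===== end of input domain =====

-- B replaces A's decrementing endswith trial-match overlap search by a KMP prefix-automaton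
-- run over the tail of the chain; the greedy superstring returned is identical.

-- ===== PORT A =====
-- A's 'while overlap >= 0: if result.endswith(kmer[:overlap]): break; overlap -= 1'.
-- At overlap 0, kmer[:0] = '' and result.endswith('') is True, so Python always breaks
-- with overlap >= 0; the countdown recursion below, with o the current overlap, is exact.
def pvAOverlap (result kmer : List Char) : Nat → Nat
  | 0 => 0
  | o + 1 =>
    if PySem.Chars.endswith result (PySem.List.slice kmer none (some ((o : Int) + 1))) then o + 1
    else pvAOverlap result kmer o

-- one iteration of A's for-loop body
def pvAStep (result kmer : List Char) : List Char :=
  if PySem.Chars.count result kmer == 0 then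
    let overlap := pvAOverlap result kmer (kmer.length - 1)
    result ++ PySem.List.slice kmer (some (overlap : Int)) none
  else result

-- port of A; on [] Python raises IndexError at k_mers[0] — excluded by Pre_shortest_chain
def shortest_chain (k_mers : List String) : String :=
  match k_mers with
  | [] => ""
  | k0 :: rest => String.ofList (rest.foldl (fun result kmer => pvAStep result kmer.toList) k0.toList)

-- ===== PORT B =====
-- 'while j and c != kmer[j]: j = fail[j-1]'; fail[j-1] < j, so fuel j bounds the loop
def pvFall (kmer : List Char) (fail : List Nat) (c : Char) : Nat → Nat → Nat
  | 0, j => j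
  | fuel + 1, j =>
    if j ≠ 0 ∧ c ≠ kmer.getD j ' ' then pvFall kmer fail c fuel (fail.getD (j - 1) 0)
    else j

-- one automaton step: the fall loop, then 'if c == kmer[j]: j += 1'
def pvAdv (kmer : List Char) (fail : List Nat) (j : Nat) (c : Char) : Nat :=
  let j' := pvFall kmer fail c j j
  if c = kmer.getD j' ' ' then j' + 1 else j'

-- 'fail = [0]*m; for i in range(1, m): … fail[i] = j' — built by appending each fail[i]
def pvFailTable (kmer : List Char) : List Nat :=
  ((PySem.List.slice kmer (some 1) none).foldl
    (fun (st : List Nat × Nat) c =>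
      let j := pvAdv kmer st.1 st.2 c
      (st.1 ++ [j], j)) ([0], 0)).1

-- one iteration of B's for-loop body
def pvBStep (result kmer : List Char) : List Char :=
  if kmer.length ≠ 0 ∧ PySem.Chars.isIn kmer result = false then
    let fail := pvFailTable kmer
    let t := if 1 < kmer.length
             then PySem.List.slice result (some (-((kmer.length : Int) - 1))) none
             else []
    let s := t.foldl (fun s c => pvAdv kmer fail s c) 0
    result ++ PySem.List.slice kmer (some (s : Int)) none
  else result

def shortest_chain_alt (k_mers : List String) : String :=
  match k_mers with
  | [] => ""
  | k0 :: rest => String.ofList (rest.foldl (fun result kmer => pvBStep result kmer.toList) k0.toList)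

-- ===== PRECONDITION & SPEC =====
-- Python A evaluates k_mers[0] first: on the empty list it raises IndexError; that is all Pre_ excludes.
def Pre_shortest_chain (k_mers : List String) : Prop := k_mers ≠ []
instance (k_mers : List String) : Decidable (Pre_shortest_chain k_mers) := by
  unfold Pre_shortest_chain; infer_instance
def pvWitness_shortest_chain : List String := ["ABC", "BCD"]

def Spec_shortest_chain (k_mers : List String) (out : String) : Prop := out = shortest_chain_alt k_mers
instance (k_mers : List String) (out : String) : Decidable (Spec_shortest_chain k_mers out) := by
  unfold Spec_shortest_chain; infer_instance

-- ===== CLAIM (what is proved, stated in full; the proofs are below) =====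
def Claim_equal_shortest_chain : Prop := ∀ (k_mers : List String), Dom_shortest_chain k_mers → Pre_shortest_chain k_mers → Spec_shortest_chain k_mers (shortest_chain k_mers)

-- ===== LEMMAS AND PROOFS =====

-- `j` is the length of the longest prefix of `p` that is a suffix of `u`
def pvGood (p : List Char) (j : Nat) (u : List Char) : Prop :=
  p.take j <:+ u ∧ ∀ b, p.take b <:+ u → b ≤ j

theorem pvCountGo_ge (sub : List Char) :
    ∀ fuel l acc, acc ≤ PySem.Chars.count.go sub fuel l acc := by
  intro fuel
  induction fuel with
  | zero => intro l acc; simp [PySem.Chars.count.go]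
  | succ f ih =>
    intro l acc
    match l with
    | [] => simp [PySem.Chars.count.go]
    | h :: t =>
      rw [PySem.Chars.count.go]
      split
      · exact le_trans (by omega) (ih _ (acc + 1))
      · exact ih _ _

theorem pvCountGo_eq_iff (sub : List Char) (hsub : sub ≠ []) :
    ∀ fuel l acc, l.length ≤ fuel →
      (PySem.Chars.count.go sub fuel l acc = acc ↔ ¬ sub <:+: l) := by
  intro fuel
  induction fuel with
  | zero =>
    intro l acc hl
    have : l = [] := List.eq_nil_of_length_eq_zero (Nat.le_zero.mp hl)
    subst this
    simp [PySem.Chars.count.go, List.infix_nil, hsub]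
  | succ f ih =>
    intro l acc hl
    match l with
    | [] => simp [PySem.Chars.count.go, List.infix_nil, hsub]
    | h :: t =>
      rw [PySem.Chars.count.go]
      split
      · rename_i hpre
        have h1 : acc + 1 ≤ PySem.Chars.count.go sub f (List.drop sub.length (h :: t)) (acc + 1) :=
          pvCountGo_ge sub _ _ _
        constructor
        · intro he; omega
        · intro hni
          exact absurd ((List.isPrefixOf_iff_prefix).mp hpre).isInfix hni
      · rename_i hpre
        have hlt : t.length ≤ f := by simpa using hl
        rw [ih t acc hlt]
        constructor
        · intro hni hin
          rcases List.infix_cons_iff.mp hin with hp | hi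
          · exact hpre ((List.isPrefixOf_iff_prefix).mpr hp)
          · exact hni hi
        · intro hni hin
          exact hni (List.infix_cons_iff.mpr (Or.inr hin))

theorem pvCount_eq_zero_iff (s sub : List Char) (hsub : sub ≠ []) :
    PySem.Chars.count s sub = 0 ↔ ¬ sub <:+: s := by
  rw [PySem.Chars.count]
  simp only [List.isEmpty_iff, hsub, if_neg]
  exact pvCountGo_eq_iff sub hsub s.length s 0 le_rfl

theorem pvAOverlap_eq (result kmer : List Char) (n : Nat) :
    pvAOverlap result kmer n = Nat.findGreatest (fun o => kmer.take o <:+ result) n := by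
  induction n with
  | zero => simp [pvAOverlap]
  | succ o ih =>
    rw [pvAOverlap, Nat.findGreatest_succ, ih]
    have hsl : PySem.List.slice kmer none (some ((o : Int) + 1)) = kmer.take (o + 1) := by
      have h1 : ((o : Int) + 1) = (((o + 1 : Nat) : Int)) := by push_cast; ring
      rw [h1, PySem.List.slice_to_natCast]
    rw [hsl]
    by_cases h : kmer.take (o + 1) <:+ result
    · simp [PySem.Chars.endswith_iff, h]
    · have hb : PySem.Chars.endswith result (kmer.take (o + 1)) = false := by
        rw [Bool.eq_false_iff]
        intro hc
        exact h ((PySem.Chars.endswith_iff _ _).mp hc)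
      simp [hb, h]

theorem pvTake_succ_getD (p : List Char) (b : Nat) (hb : b < p.length) :
    p.take (b + 1) = p.take b ++ [p.getD b ' '] := by
  rw [List.getD_eq_getElem p ' ' hb, List.take_append_getElem]

theorem pvSuffix_snoc_intro (x u : List Char) (c : Char) (h : x <:+ u) :
    x ++ [c] <:+ u ++ [c] := by
  obtain ⟨w, hw⟩ := h
  exact ⟨w, by rw [← List.append_assoc, hw]⟩

theorem pvSuffix_snoc_decomp (p u : List Char) (c : Char) (b : Nat)
    (hlen : u.length + 2 ≤ p.length)
    (hs : p.take (b + 1) <:+ u ++ [c]) :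
    b < p.length ∧ p.take b <:+ u ∧ p.getD b ' ' = c := by
  have hble : b + 1 ≤ p.length := by
    by_contra hgt
    have hpt : p.take (b + 1) = p := List.take_of_length_le (by omega)
    rw [hpt] at hs
    have := hs.length_le
    simp at this
    omega
  have hb : b < p.length := by omega
  rw [pvTake_succ_getD p b hb] at hs
  have hrev : (p.getD b ' ') :: (p.take b).reverse <+: c :: u.reverse := by
    have := List.reverse_prefix.mpr hs
    simpa using this
  obtain ⟨hc, hpre⟩ := List.cons_prefix_cons.mp hrev
  refine ⟨hb, ?_, hc⟩
  have := List.reverse_prefix.mp (by simpa using hpre)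
  simpa using this

theorem pvTake_suffix_le (p u : List Char) (b : Nat) (hp : p ≠ [])
    (hs : p.take b <:+ u) (hu : u.length < p.length) : b ≤ u.length := by
  have h1 := hs.length_le
  rw [List.length_take] at h1
  rcases Nat.le_total b p.length with h | h
  · omega
  · rw [min_eq_right h] at h1; omega

theorem pvFall_spec (p : List Char) (F : List Nat) (u : List Char) (c : Char) :
    ∀ fuel j, j ≤ fuel → p ≠ [] → j < p.length →
    (∀ k, k < j → pvGood p (F.getD k 0) ((p.take (k + 1)).drop 1)) →
    p.take j <:+ u →
    pvFall p F c fuel j ≤ j ∧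
    p.take (pvFall p F c fuel j) <:+ u ∧
    (pvFall p F c fuel j = 0 ∨ p.getD (pvFall p F c fuel j) ' ' = c) ∧
    (∀ b, b ≤ j → p.take b <:+ u → p.getD b ' ' = c → b ≤ pvFall p F c fuel j) := by
  intro fuel
  induction fuel with
  | zero =>
    intro j hj _ _ _ hsuf
    have : j = 0 := by omega
    subst this
    exact ⟨le_rfl, hsuf, Or.inl rfl, fun b hb _ _ => hb⟩
  | succ f ih =>
    intro j hjf hp hjm hF hsuf
    rw [pvFall]
    by_cases hcond : j ≠ 0 ∧ c ≠ p.getD j ' '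
    · rw [if_pos hcond]
      obtain ⟨hj0, hcj⟩ := hcond
      have hG := hF (j - 1) (by omega)
      have hkj : j - 1 + 1 = j := by omega
      rw [hkj] at hG
      -- j₂ := F.getD (j-1) 0, the longest proper border of p.take j
      set j₂ := F.getD (j - 1) 0 with hj₂def
      have hvlen : ((p.take j).drop 1).length = j - 1 := by
        rw [List.length_drop, List.length_take]; omega
      have hj₂le : j₂ ≤ j - 1 := by
        have := pvTake_suffix_le p _ j₂ hp hG.1 (by rw [hvlen]; omega)
        omega
      have htail : (p.take j).drop 1 <:+ p.take j := List.drop_suffix 1 _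
      have hju : p.take j₂ <:+ u := (hG.1.trans htail).trans hsuf
      have hrec := ih j₂ (by omega) hp (by omega)
        (fun k hk => hF k (by omega)) hju
      refine ⟨by omega, hrec.2.1, hrec.2.2.1, ?_⟩
      intro b hb hbu hbc
      have hbj : b ≠ j := by
        intro he; subst he; exact hcj hbc.symm
      have hbj' : b ≤ j - 1 := by omega
      have hbtj : p.take b <:+ p.take j := by
        apply List.suffix_of_suffix_length_le hbu hsuf
        rw [List.length_take, List.length_take]
        exact min_le_min (by omega) le_rfl
      have hbtv : p.take b <:+ (p.take j).drop 1 := by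
        apply List.suffix_of_suffix_length_le hbtj htail
        rw [List.length_take, hvlen]
        have : min b p.length ≤ b := min_le_left _ _
        omega
      have hbj₂ : b ≤ j₂ := hG.2 b hbtv
      exact hrec.2.2.2 b hbj₂ hbu hbc
    · rw [if_neg hcond]
      push_neg at hcond
      refine ⟨le_rfl, hsuf, ?_, fun b hb _ _ => hb⟩
      by_cases hj0 : j = 0
      · exact Or.inl hj0
      · exact Or.inr (hcond hj0).symm

theorem pvAdv_good (p : List Char) (F : List Nat) (u : List Char) (c : Char) (j : Nat)
    (hp : p ≠ []) (hlen : u.length + 2 ≤ p.length)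
    (hF : ∀ k, k < j → pvGood p (F.getD k 0) ((p.take (k + 1)).drop 1))
    (hj : pvGood p j u) :
    pvGood p (pvAdv p F j c) (u ++ [c]) := by
  have hjm : j < p.length := by
    have := pvTake_suffix_le p u j hp hj.1 (by omega)
    omega
  obtain ⟨hrle, hrsuf, hror, hrmax⟩ :=
    pvFall_spec p F u c j j le_rfl hp hjm hF hj.1
  set r := pvFall p F c j j with hrdef
  unfold pvAdv
  rw [← hrdef]
  by_cases hc : c = p.getD r ' '
  · rw [if_pos hc]
    constructor
    · rw [pvTake_succ_getD p r (by omega), ← hc]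
      exact pvSuffix_snoc_intro _ _ _ hrsuf
    · intro b hb
      match b with
      | 0 => omega
      | b' + 1 =>
        obtain ⟨_, hbu, hbc⟩ := pvSuffix_snoc_decomp p u c b' hlen hb
        have hbj : b' ≤ j := hj.2 b' hbu
        have := hrmax b' hbj hbu hbc
        omega
  · rw [if_neg hc]
    have hr0 : r = 0 := by
      rcases hror with h | h
      · exact h
      · exact absurd h.symm hc
    constructor
    · rw [hr0]; simpa using List.nil_suffix
    · intro b hb
      match b with
      | 0 => omega
      | b' + 1 =>
        obtain ⟨_, hbu, hbc⟩ := pvSuffix_snoc_decomp p u c b' hlen hb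
        have hbj : b' ≤ j := hj.2 b' hbu
        have hb'r : b' ≤ r := hrmax b' hbj hbu hbc
        rw [hr0] at hb'r
        have : b' = 0 := by omega
        subst this
        exact absurd hbc.symm (by rwa [hr0] at hc)

theorem pvGood_zero_nil (p : List Char) (hp : p ≠ []) : pvGood p 0 [] := by
  constructor
  · simpa using List.nil_suffix
  · intro b hb
    rw [List.suffix_nil] at hb
    rcases List.take_eq_nil_iff.mp hb with h | h
    · omega
    · exact absurd h hp

theorem pvBuild_inv (p : List Char) (hp : p ≠ []) :
    ∀ n, n ≤ p.length - 1 →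
    (((p.drop 1).take n).foldl (fun (st : List Nat × Nat) c =>
        (st.1 ++ [pvAdv p st.1 st.2 c], pvAdv p st.1 st.2 c)) ([0], 0)).1.length = n + 1 ∧
    (((p.drop 1).take n).foldl (fun (st : List Nat × Nat) c =>
        (st.1 ++ [pvAdv p st.1 st.2 c], pvAdv p st.1 st.2 c)) ([0], 0)).2 =
      (((p.drop 1).take n).foldl (fun (st : List Nat × Nat) c =>
        (st.1 ++ [pvAdv p st.1 st.2 c], pvAdv p st.1 st.2 c)) ([0], 0)).1.getD n 0 ∧
    ∀ k, k ≤ n → pvGood p ((((p.drop 1).take n).foldl (fun (st : List Nat × Nat) c =>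
        (st.1 ++ [pvAdv p st.1 st.2 c], pvAdv p st.1 st.2 c)) ([0], 0)).1.getD k 0)
      ((p.take (k + 1)).drop 1) := by
  intro n
  induction n with
  | zero =>
    intro _
    refine ⟨rfl, rfl, ?_⟩
    intro k hk
    have : k = 0 := by omega
    subst this
    have h1 : (p.take 1).drop 1 = [] := by
      cases p with
      | nil => simp
      | cons a t => simp
    rw [h1]
    simpa using pvGood_zero_nil p hp
  | succ n ih =>
    intro hn1
    have hlen2 : 2 ≤ p.length := by
      by_contra h
      interval_cases hpl : p.length <;> omega
    have hn : n ≤ p.length - 1 := by omega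
    obtain ⟨ihlen, ihsnd, ihG⟩ := ih hn
    have hnd : n < (p.drop 1).length := by
      rw [List.length_drop]; omega
    have hnp : n + 1 < p.length := by omega
    obtain ⟨c, hc⟩ : ∃ c, p[n + 1]'hnp = c := ⟨_, rfl⟩
    have htk : (p.drop 1).take (n + 1) = (p.drop 1).take n ++ [c] := by
      rw [← hc, ← List.take_append_getElem hnd]
      simp [List.getElem_drop, Nat.add_comm]
    rcases hst : ((p.drop 1).take n).foldl (fun (st : List Nat × Nat) c =>
        (st.1 ++ [pvAdv p st.1 st.2 c], pvAdv p st.1 st.2 c)) ([0], 0) with ⟨F, j⟩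
    rw [hst] at ihlen ihsnd ihG
    rw [htk, List.foldl_append, hst]
    simp only [List.foldl_cons, List.foldl_nil] at ihlen ihsnd ihG ⊢
    have hu : ((p.take (n + 1)).drop 1).length = n := by
      rw [List.length_drop, List.length_take]; omega
    have hGn : pvGood p j ((p.take (n + 1)).drop 1) := by
      rw [ihsnd]; exact ihG n le_rfl
    have hadv : pvGood p (pvAdv p F j c) ((p.take (n + 1)).drop 1 ++ [c]) := by
      apply pvAdv_good p F _ c j hp (by omega) _ hGn
      intro k hk
      have hkn : k ≤ n := by
        have hj2 := pvTake_suffix_le p _ j hp hGn.1 (by rw [hu]; omega)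
        omega
      exact ihG k hkn
    have hext : (p.take (n + 1)).drop 1 ++ [c] = (p.take (n + 2)).drop 1 := by
      rw [← hc, ← List.take_append_getElem hnp,
          List.drop_append_of_le_length (by rw [List.length_take]; omega)]
    rw [hext] at hadv
    refine ⟨?_, ?_, ?_⟩
    · simp [List.length_append, ihlen]
    · rw [List.getD_eq_getElem _ 0 (by simp [ihlen])]
      rw [List.getElem_append_right (by omega)]
      simp [ihlen]
    · intro k hk
      rcases Nat.lt_or_ge k (n + 1) with hlt | hge
      · have hgd : (F ++ [pvAdv p F j c]).getD k 0 = F.getD k 0 := by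
          unfold List.getD
          rw [List.getElem?_append_left (by omega)]
        rw [hgd]
        exact ihG k (by omega)
      · have hkeq : k = n + 1 := by omega
        subst hkeq
        have hgd : (F ++ [pvAdv p F j c]).getD (n + 1) 0 = pvAdv p F j c := by
          unfold List.getD
          rw [List.getElem?_append_right (by omega)]
          simp [ihlen]
        rw [hgd]
        exact hadv

theorem pvFailTable_spec (p : List Char) (hp : p ≠ []) :
    ∀ k, k ≤ p.length - 1 → pvGood p ((pvFailTable p).getD k 0) ((p.take (k + 1)).drop 1) := by
  intro k hk
  have hft : pvFailTable p = (((p.drop 1).take (p.length - 1)).foldl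
      (fun (st : List Nat × Nat) c =>
        (st.1 ++ [pvAdv p st.1 st.2 c], pvAdv p st.1 st.2 c)) ([0], 0)).1 := by
    unfold pvFailTable
    rw [PySem.List.slice_from_one, ← List.drop_one]
    rw [List.take_of_length_le (by rw [List.length_drop])]
  rw [hft]
  obtain ⟨_, _, hG⟩ := pvBuild_inv p hp (p.length - 1) le_rfl
  -- entries at k ≤ p.length - 1 are all covered
  exact hG k hk

theorem pvRun_good (p : List Char) (hp : p ≠ []) (t : List Char) (ht : t.length ≤ p.length - 1) :
    pvGood p (t.foldl (fun s c => pvAdv p (pvFailTable p) s c) 0) t := by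
  induction t using List.reverseRecOn with
  | nil => simpa using pvGood_zero_nil p hp
  | append_singleton t c ih =>
    rw [List.length_append] at ht
    simp only [List.length_cons, List.length_nil] at ht
    have hplen : 1 ≤ p.length := by
      cases p with
      | nil => exact absurd rfl hp
      | cons a l => simp
    have ht' : t.length ≤ p.length - 1 := by omega
    have hG := ih ht'
    rw [List.foldl_append]
    simp only [List.foldl_cons, List.foldl_nil]
    apply pvAdv_good p (pvFailTable p) t c _ hp (by omega) _ hG
    intro k hk
    have hkb : k ≤ p.length - 1 := by
      have := pvTake_suffix_le p t _ hp hG.1 (by omega)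
      omega
    exact pvFailTable_spec p hp k hkb

theorem pvStep_eq (result kmer : List Char) : pvAStep result kmer = pvBStep result kmer := by
  unfold pvAStep pvBStep
  by_cases hk : kmer = []
  · subst hk
    rw [PySem.Chars.count]
    simp
  · by_cases hin : kmer <:+: result
    · have hc : PySem.Chars.count result kmer ≠ 0 := by
        rw [Ne, pvCount_eq_zero_iff result kmer hk]
        simpa using hin
      have hi : PySem.Chars.isIn kmer result = true := (PySem.Chars.isIn_iff_infix _ _).mpr hin
      simp [hc, hi]
    · have hc : PySem.Chars.count result kmer = 0 := (pvCount_eq_zero_iff result kmer hk).mpr hin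
      have hi : PySem.Chars.isIn kmer result = false := (PySem.Chars.isIn_eq_false_iff _ _).mpr hin
      have hkl : kmer.length ≠ 0 := by simpa [List.length_eq_zero_iff] using hk
      rw [if_pos (by simp [hc]), if_pos ⟨hkl, hi⟩]
      simp only
      -- both branches append kmer with the maximal overlap dropped; show the overlaps agree
      set m := kmer.length with hm
      have hm1 : 1 ≤ m := by omega
      have hAO : pvAOverlap result kmer (m - 1)
          = Nat.findGreatest (fun o => kmer.take o <:+ result) (m - 1) :=
        pvAOverlap_eq result kmer (m - 1)
      by_cases hm2 : 1 < m
      · -- t = the last m-1 characters of result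
        rw [if_pos hm2]
        have hneg : -((m : Int) - 1) = -(((m - 1 : Nat) : Int)) := by
          push_cast [Nat.cast_sub hm1]; ring
        rw [hneg, PySem.List.slice_from_neg_natCast result (m - 1) (by omega)]
        set t := result.drop (result.length - (m - 1)) with htdef
        have htlen : t.length = min (m - 1) result.length := by
          rw [htdef, List.length_drop]; omega
        have hts : t <:+ result := List.drop_suffix _ _
        have hGs := pvRun_good kmer hk t (by omega)
        set s := t.foldl (fun s c => pvAdv kmer (pvFailTable kmer) s c) 0 with hsdef
        have hsm : s ≤ m - 1 := by
          have := pvTake_suffix_le kmer t s hk hGs.1 (by omega)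
          omega
        have hPs : kmer.take s <:+ result := hGs.1.trans hts
        have hupper : ∀ o, kmer.take o <:+ result → o ≤ m - 1 → o ≤ s := by
          intro o ho hom
          have holen : (kmer.take o).length = o := by
            rw [List.length_take]; omega
          have hores : o ≤ result.length := by
            have := ho.length_le; omega
          have hot : kmer.take o <:+ t := by
            apply List.suffix_of_suffix_length_le ho hts
            rw [holen, htlen]; omega
          exact hGs.2 o hot
        have hfg : Nat.findGreatest (fun o => kmer.take o <:+ result) (m - 1) = s := by
          apply le_antisymm
          · have hPf : kmer.take (Nat.findGreatest (fun o => kmer.take o <:+ result) (m - 1))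
                <:+ result := Nat.findGreatest_spec (P := fun o => kmer.take o <:+ result) hsm hPs
            exact hupper _ hPf (Nat.findGreatest_le _)
          · exact Nat.le_findGreatest hsm hPs
        rw [hAO, hfg]
      · -- m = 1: A's countdown starts (and ends) at 0, B runs over the empty tail
        rw [if_neg hm2]
        have hmeq : m = 1 := by omega
        have h0 : pvAOverlap result kmer (m - 1) = 0 := by
          rw [hmeq]; rfl
        rw [h0]
        simp

-- ===== VERDICT (by name: the statement is the Claim_ definition above) =====
theorem shortest_chain_spec : Claim_equal_shortest_chain := by
  intro k_mers _ hpre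
  unfold Spec_shortest_chain shortest_chain shortest_chain_alt
  match k_mers with
  | [] => exact absurd rfl hpre
  | k0 :: rest =>
    have hfun : (fun (result : List Char) (kmer : String) => pvAStep result kmer.toList)
         = (fun (result : List Char) (kmer : String) => pvBStep result kmer.toList) := by
      funext r k; exact pvStep_eq r k.toList
    simp only [hfun]
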